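-- pv_equiv track=rewrite | github.com/simingh124/skills | read-paper-pro/scripts/extract_reference_links.py | deduplicate
-- ===== SOURCE A (Python) =====
-- def deduplicate(entries: list[dict[str, str]]) -> list[dict[str, str]]:
--     deduped: dict[str, dict[str, str]] = {}
--     for entry in entries:
--         key = entry["normalized_title"] or entry["key"]
--         existing = deduped.get(key)
--         if existing is None or (not existing.get("link") and entry.get("link")):
--             deduped[key] = entry
--     return sorted(deduped.values(), key=lambda item: item["title"].lower())
-- ===== SOURCE B (Python) =====
-- def deduplicate(entries: list[dict[str, str]]) -> list[dict[str, str]]: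
--     groups: dict[str, list[dict[str, str]]] = {}
--     for entry in entries:
--         key = entry["normalized_title"] or entry["key"]
--         groups.setdefault(key, []).append(entry)
--     chosen = [next((e for e in group if e.get("link")), group[0])
--               for group in groups.values()]
--     return sorted(chosen, key=lambda item: item["title"].lower())
-- ===== Notes on version B (the rewrite author's own statement) =====
-- stated objective: alternative
-- what changed: A maintains one winner per key with a conditional overwrite inside the scan; B first groups entries per key with setdefault/append and then, per group, picks the first entry with a truthy link (else the first entry) before sorting by lowercased title.
import Mathlib
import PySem

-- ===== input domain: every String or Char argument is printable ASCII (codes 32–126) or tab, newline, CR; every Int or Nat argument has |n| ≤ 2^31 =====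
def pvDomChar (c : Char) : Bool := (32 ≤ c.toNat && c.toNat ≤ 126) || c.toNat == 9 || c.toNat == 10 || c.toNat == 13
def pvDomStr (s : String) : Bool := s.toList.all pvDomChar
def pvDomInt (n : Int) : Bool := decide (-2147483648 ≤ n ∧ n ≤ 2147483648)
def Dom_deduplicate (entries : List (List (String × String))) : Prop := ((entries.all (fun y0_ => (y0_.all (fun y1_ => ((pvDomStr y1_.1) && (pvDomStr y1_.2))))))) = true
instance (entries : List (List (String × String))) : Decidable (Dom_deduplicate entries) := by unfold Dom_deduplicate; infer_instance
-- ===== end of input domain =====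

-- B groups entries per key first and then selects per group (first entry with a truthy link, else the first entry),
-- instead of A's conditional-overwrite scan; same cost, different decomposition ("alternative").

-- ===== PORT A =====
-- shared helpers: first-match lookup in an entry (a Python dict as an association list),
-- Python truthiness of an optional string, the dedup key 'entry["normalized_title"] or entry["key"]',
-- and the sort key 'item["title"].lower()'
def pvGet (e : List (String × String)) (k : String) : Option String :=
  (e.find? (fun p => p.1 == k)).map (·.2)

def pvTruthy (o : Option String) : Bool := decide (o.getD "" ≠ "")

def pvKey (e : List (String × String)) : String :=
  match pvGet e "normalized_title" with
  | some nt => if nt ≠ "" then nt else (pvGet e "key").getD ""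
  | none => ""   -- unreachable under Pre_ (Python raises KeyError)

def pvTitleKey (e : List (String × String)) : String :=
  PySem.Str.lower ((pvGet e "title").getD "")   -- the .getD "" is unreachable under Pre_ (Python raises KeyError)

-- 'deduped': the loop's dict; 'key := pvKey entry' is inlined at its use sites
def deduplicate (entries : List (List (String × String))) : List (List (String × String)) :=
  PySem.List.sorted
    (entries.foldl
      (fun d entry =>
        match d.get? (pvKey entry) with
        | none => d.insert (pvKey entry) entry
        | some existing =>
          if !pvTruthy (pvGet existing "link") && pvTruthy (pvGet entry "link")
          then d.insert (pvKey entry) entry else d)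
      PySem.Dict.empty).values
    pvTitleKey

-- ===== PORT B =====
def pvChoose (g : List (List (String × String))) : List (String × String) :=
  match g.find? (fun e => pvTruthy (pvGet e "link")) with
  | some e => e
  | none => g.headD []

def deduplicate_alt (entries : List (List (String × String))) : List (List (String × String)) :=
  PySem.List.sorted
    (((entries.foldl (fun d entry => d.modify (pvKey entry) [] (· ++ [entry]))
        PySem.Dict.empty).values).map pvChoose)
    pvTitleKey

-- ===== PRECONDITION & SPEC =====
-- Pre_ excludes exactly the inputs where the Python A raises KeyError: an entry without
-- "normalized_title", an entry with empty "normalized_title" and no "key", or an entry without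
-- "title" (which entries' titles are read depends on the run, so "title" is required on all —
-- this slightly narrows Pre_ on inputs whose title-less entries all lose the dedup).
def Pre_deduplicate (entries : List (List (String × String))) : Prop :=
  ∀ e ∈ entries,
    (pvGet e "normalized_title").isSome = true ∧
    (pvGet e "normalized_title" = some "" → (pvGet e "key").isSome = true) ∧
    (pvGet e "title").isSome = true
instance (entries : List (List (String × String))) : Decidable (Pre_deduplicate entries) := by
  unfold Pre_deduplicate; infer_instance

def pvWitness_deduplicate : (List (List (String × String))) :=
  [[("normalized_title", "a"), ("key", "k"), ("title", "A Title"), ("link", "http://x")],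
   [("normalized_title", ""), ("key", "k2"), ("title", "b")]]

def Spec_deduplicate (entries : List (List (String × String))) (out : List (List (String × String))) : Prop := out = deduplicate_alt entries
instance (entries : List (List (String × String))) (out : List (List (String × String))) : Decidable (Spec_deduplicate entries out) := by unfold Spec_deduplicate; infer_instance

-- ===== CLAIM (what is proved, stated in full; the proofs are below) =====
def Claim_equal_deduplicate : Prop := ∀ (entries : List (List (String × String))), Dom_deduplicate entries → Pre_deduplicate entries → Spec_deduplicate entries (deduplicate entries)

-- ===== LEMMAS AND PROOFS =====

theorem pvChoose_singleton (e : List (String × String)) : pvChoose [e] = e := by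
  unfold pvChoose
  cases hp : pvTruthy (pvGet e "link") <;> simp [List.find?, hp]

theorem pvChoose_append_singleton (g : List (List (String × String))) (e : List (String × String))
    (hg : g ≠ []) :
    pvChoose (g ++ [e]) =
      if !pvTruthy (pvGet (pvChoose g) "link") && pvTruthy (pvGet e "link")
      then e else pvChoose g := by
  unfold pvChoose
  rw [List.find?_append]
  cases hf : g.find? (fun e => pvTruthy (pvGet e "link")) with
  | some x =>
    have hx := List.find?_some hf
    simp [hx]
  | none =>
    have hall := List.find?_eq_none.mp hf
    cases g with
    | nil => exact absurd rfl hg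
    | cons a t =>
      have ha : pvTruthy (pvGet a "link") = false := by
        simpa using hall a (by simp)
      have hhead : pvTruthy (pvGet ((a :: t).headD []) "link") = false := by simpa using ha
      rw [hhead]
      by_cases he : pvTruthy (pvGet e "link") = true
      · simp [List.find?, he]
      · simp [List.find?, he]

theorem deduplicate_loop_inv (l : List (List (String × String)))
    (dA : PySem.Dict String (List (String × String)))
    (dB : PySem.Dict String (List (List (String × String))))
    (hk : dB.keys.Nodup)
    (h : dA.items = dB.items.map (fun p => (p.1, pvChoose p.2)))
    (hne : ∀ p ∈ dB.items, p.2 ≠ []) :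
    (l.foldl (fun d entry =>
      match d.get? (pvKey entry) with
      | none => d.insert (pvKey entry) entry
      | some existing =>
        if !pvTruthy (pvGet existing "link") && pvTruthy (pvGet entry "link")
        then d.insert (pvKey entry) entry else d) dA).items
    = ((l.foldl (fun d entry => d.modify (pvKey entry) [] (· ++ [entry])) dB).items).map
        (fun p => (p.1, pvChoose p.2)) := by
  induction l generalizing dA dB with
  | nil => simpa using h
  | cons ent l ih =>
    have hkeys : dA.keys = dB.keys := by
      simp only [PySem.Dict.keys, h, List.map_map]
      rfl
    simp only [List.foldl_cons]
    cases hB : dB.get? (pvKey ent) with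
    | none =>
      have hcB : dB.contains (pvKey ent) = false :=
        (PySem.Dict.get?_eq_none_iff_contains _ _).mp hB
      have hcA : dA.contains (pvKey ent) = false := by
        rw [PySem.Dict.contains_eq_decide_mem_keys, hkeys,
          ← PySem.Dict.contains_eq_decide_mem_keys]
        exact hcB
      have hA : dA.get? (pvKey ent) = none :=
        (PySem.Dict.get?_eq_none_iff_contains _ _).mpr hcA
      have hmod : dB.modify (pvKey ent) [] (· ++ [ent]) = dB.insert (pvKey ent) [ent] := by
        simp [PySem.Dict.modify, PySem.Dict.getD_of_not_contains _ _ hcB]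
      simp only [hA, hmod]
      apply ih
      · exact PySem.Dict.nodup_keys_insert _ _ _ hk
      · rw [PySem.Dict.items_insert_of_not_contains _ _ hcA,
          PySem.Dict.items_insert_of_not_contains _ _ hcB]
        simp [h, pvChoose_singleton]
      · intro p hp
        rw [PySem.Dict.items_insert_of_not_contains _ _ hcB] at hp
        rcases List.mem_append.mp hp with hp | hp
        · exact hne p hp
        · simp at hp; subst hp; simp
    | some g =>
      have hgmem := PySem.Dict.mem_items_of_get?_eq_some _ hB
      have hgne : g ≠ [] := hne _ hgmem
      have hkA : dA.keys.Nodup := hkeys ▸ hk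
      have hA : dA.get? (pvKey ent) = some (pvChoose g) := by
        apply PySem.Dict.get?_of_mem_items dA _ hkA
        rw [h]
        exact List.mem_map_of_mem hgmem
      have hcB : dB.contains (pvKey ent) = true := by
        rw [PySem.Dict.contains_eq_isSome_get?, hB]; rfl
      have hcA : dA.contains (pvKey ent) = true := by
        rw [PySem.Dict.contains_eq_isSome_get?, hA]; rfl
      have hmod : dB.modify (pvKey ent) [] (· ++ [ent]) = dB.insert (pvKey ent) (g ++ [ent]) := by
        simp [PySem.Dict.modify, PySem.Dict.getD_of_get?_eq_some _ _ hB]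
      -- any item of dB keyed at pvKey ent carries the group g
      have hval : ∀ p ∈ dB.items, (p.1 == pvKey ent) = true → p.2 = g := by
        intro p hp hpk
        obtain ⟨p1, p2⟩ := p
        have hpk' : p1 = pvKey ent := by simpa using hpk
        subst hpk'
        have := PySem.Dict.get?_of_mem_items dB hp hk
        rw [hB] at this
        exact (Option.some.inj this).symm
      have hitemsB : (dB.insert (pvKey ent) (g ++ [ent])).items
          = dB.items.map (fun p => if (p.1 == pvKey ent) = true then (pvKey ent, g ++ [ent]) else p) :=
        PySem.Dict.items_insert_of_contains _ _ hcB
      simp only [hA, hmod]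
      apply ih
      · exact PySem.Dict.nodup_keys_insert _ _ _ hk
      · rw [hitemsB, List.map_map]
        by_cases hc : (!pvTruthy (pvGet (pvChoose g) "link") && pvTruthy (pvGet ent "link")) = true
        · rw [if_pos hc, PySem.Dict.items_insert_of_contains _ _ hcA, h, List.map_map]
          apply List.map_congr_left
          intro p hp
          by_cases hpk : (p.1 == pvKey ent) = true
          · have hpg := hval p hp hpk
            simp [Function.comp, hpk, pvChoose_append_singleton g ent hgne, hc]
          · simp [Function.comp, hpk]
        · have hc' : (!pvTruthy (pvGet (pvChoose g) "link") && pvTruthy (pvGet ent "link")) = false :=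
            by simpa using hc
          rw [if_neg hc, h]
          apply List.map_congr_left
          intro p hp
          by_cases hpk : (p.1 == pvKey ent) = true
          · have hpg := hval p hp hpk
            have hpk' : p.1 = pvKey ent := by simpa using hpk
            simp [Function.comp, hpg, pvChoose_append_singleton g ent hgne, hc', hpk']
          · simp [Function.comp, hpk]
      · intro p hp
        rcases (PySem.Dict.mem_items_insert _ _ _ _).mp hp with hp | ⟨hp, _⟩
        · subst hp; simp
        · exact hne p hp

-- ===== VERDICT (by name: the statement is the Claim_ definition above) =====
theorem deduplicate_spec : Claim_equal_deduplicate := by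
  intro entries _hdom _hpre
  unfold Spec_deduplicate deduplicate deduplicate_alt
  have hinv := deduplicate_loop_inv entries PySem.Dict.empty PySem.Dict.empty
    (by decide) rfl (by intro p hp; simp [PySem.Dict.empty] at hp)
  have hv : (entries.foldl (fun d entry =>
      match d.get? (pvKey entry) with
      | none => d.insert (pvKey entry) entry
      | some existing =>
        if !pvTruthy (pvGet existing "link") && pvTruthy (pvGet entry "link")
        then d.insert (pvKey entry) entry else d) PySem.Dict.empty).values
      = ((entries.foldl (fun d entry => d.modify (pvKey entry) [] (· ++ [entry]))
          PySem.Dict.empty).values).map pvChoose := by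
    simp only [PySem.Dict.values, hinv, List.map_map]
    rfl
  rw [hv]
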